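-- pv_equiv track=rewrite | github.com/ChristopherHaynes/LFEDocumentClassifier | InputCleaner.py | removeNumericCharactersFromText
-- ===== SOURCE A (Python) =====
-- import string
--
-- def removeNumericCharactersFromText(rawText):
--     newText = ''
--     for i in range(0, len(rawText)):
--         character = rawText[i]
--
--         if character.isnumeric():
--             continue
--
--         # Check the next character for being a decimal point or other numeric punctuation
--         if character in string.punctuation and i + 1 < len(rawText) and rawText[i + 1].isnumeric():
--             continue
--
--         newText = newText + character
--     return newText
-- ===== SOURCE B (Python) =====
-- import string
--
-- def removeNumericCharactersFromText(rawText):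
--     # Single reverse pass with a flag remembering whether the character
--     # immediately to the right was numeric.
--     out = []
--     nextIsNumeric = False
--     for ch in reversed(rawText):
--         if ch.isnumeric():
--             nextIsNumeric = True
--         elif ch in string.punctuation and nextIsNumeric:
--             nextIsNumeric = False
--         else:
--             out.append(ch)
--             nextIsNumeric = False
--     return ''.join(reversed(out))
-- ===== Notes on version B (the rewrite author's own statement) =====
-- stated objective: alternative
-- what changed: Replaces A's index-based forward loop with rawText[i]/rawText[i+1] lookahead by a reverse single pass carrying a 'char to my right was numeric' flag, collecting kept characters in a list joined once at the end.
import Mathlib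
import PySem

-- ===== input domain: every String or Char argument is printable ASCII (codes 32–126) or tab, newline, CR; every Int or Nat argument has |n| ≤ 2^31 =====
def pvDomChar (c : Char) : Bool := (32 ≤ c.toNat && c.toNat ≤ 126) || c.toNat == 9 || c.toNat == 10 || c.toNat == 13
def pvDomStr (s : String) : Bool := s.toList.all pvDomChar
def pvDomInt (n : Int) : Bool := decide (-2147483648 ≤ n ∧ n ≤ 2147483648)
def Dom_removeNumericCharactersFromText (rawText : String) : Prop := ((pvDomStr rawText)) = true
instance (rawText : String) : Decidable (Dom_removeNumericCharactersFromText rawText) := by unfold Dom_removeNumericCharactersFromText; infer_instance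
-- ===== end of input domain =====

-- B replaces A's index-based loop with lookahead by a reverse single-pass state
-- machine carrying a "next char is numeric" flag (objective: alternative).

-- 'c in string.punctuation' (the fixed ASCII punctuation set)
def pyPunct (c : Char) : Bool := "!\"#$%&'()*+,-./:;<=>?@[\\]^_`{|}~".toList.contains c

-- ===== PORT A =====
-- '.isnumeric()' is ported as PySem.Chars.isdigit, exact on the printable-ASCII domain.
def removeNumericCharactersFromText (rawText : String) : String :=
  let cs := rawText.toList
  String.mk <| (PySem.List.pyRange 0 cs.length 1).foldl (fun acc i =>
    let character := PySem.List.pyGetD cs i ' '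
    if PySem.Chars.isdigit character then acc
    else if pyPunct character && decide (i + 1 < (cs.length : Int)) &&
            PySem.Chars.isdigit (PySem.List.pyGetD cs (i + 1) ' ') then acc
    else acc ++ [character]) []

-- ===== PORT B =====
def removeNumericCharactersFromText_alt (rawText : String) : String :=
  let s := rawText.toList.reverse.foldl (fun (st : List Char × Bool) ch =>
    if PySem.Chars.isdigit ch then (st.1, true)
    else if pyPunct ch && st.2 then (st.1, false)
    else (st.1 ++ [ch], false)) ([], false)
  String.mk s.1.reverse

-- ===== PRECONDITION & SPEC =====
def Spec_removeNumericCharactersFromText (rawText : String) (out : String) : Prop := out = removeNumericCharactersFromText_alt rawText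
instance (rawText : String) (out : String) : Decidable (Spec_removeNumericCharactersFromText rawText out) := by unfold Spec_removeNumericCharactersFromText; infer_instance

-- ===== CLAIM (what is proved, stated in full; the proofs are below) =====
def Claim_equal_removeNumericCharactersFromText : Prop := ∀ (rawText : String), Dom_removeNumericCharactersFromText rawText → Spec_removeNumericCharactersFromText rawText (removeNumericCharactersFromText rawText)

-- ===== LEMMAS AND PROOFS =====

-- common characterisation: left-to-right recursion with one-char lookahead
def nextDigit (l : List Char) : Bool := PySem.Chars.isdigit (l.headD ' ')

def stripNum : List Char → List Char
  | [] => []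
  | c :: rest =>
    if PySem.Chars.isdigit c then stripNum rest
    else if pyPunct c && nextDigit rest then stripNum rest
    else c :: stripNum rest

theorem lemB (cs : List Char) :
    cs.reverse.foldl (fun (st : List Char × Bool) ch =>
      if PySem.Chars.isdigit ch then (st.1, true)
      else if pyPunct ch && st.2 then (st.1, false)
      else (st.1 ++ [ch], false)) ([], false)
    = ((stripNum cs).reverse, nextDigit cs) := by
  induction cs with
  | nil => rfl
  | cons c rest ih =>
    simp only [List.reverse_cons, List.foldl_append, ih, List.foldl_cons, List.foldl_nil,
      stripNum]
    by_cases h1 : PySem.Chars.isdigit c = true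
    · simp [h1, nextDigit]
    · simp only [nextDigit, List.headD]
      simp [h1]
      split_ifs with h2 <;> simp

theorem lemA (rest : List Char) : ∀ (pre acc : List Char),
    (PySem.List.pyRange (pre.length : Int) (((pre.length + rest.length : Nat) : Int)) 1).foldl
      (fun acc i =>
        let character := PySem.List.pyGetD (pre ++ rest) i ' '
        if PySem.Chars.isdigit character then acc
        else if pyPunct character && decide (i + 1 < ((pre ++ rest).length : Int)) &&
                PySem.Chars.isdigit (PySem.List.pyGetD (pre ++ rest) (i + 1) ' ') then acc
        else acc ++ [character]) acc
    = acc ++ stripNum rest := by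
  induction rest with
  | nil =>
    intro pre acc
    rw [PySem.List.pyRange_one_eq_nil (by simp)]
    simp [stripNum]
  | cons c rest ih =>
    intro pre acc
    rw [PySem.List.pyRange_one_cons
      (by push_cast [List.length_cons]; omega)]
    rw [List.foldl_cons]
    have hget : PySem.List.pyGetD (pre ++ c :: rest) (pre.length : Int) ' ' = c := by
      rw [PySem.List.pyGetD_natCast]
      simp [List.getD]
    have hget2 : PySem.List.pyGetD (pre ++ c :: rest) ((pre.length : Int) + 1) ' '
        = rest.headD ' ' := by
      rw [show ((pre.length : Int) + 1) = ((pre.length + 1 : Nat) : Int) by push_cast; ring]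
      rw [PySem.List.pyGetD_natCast]
      cases rest with
      | nil => simp [List.getD]
      | cons d t => simp [List.getD]
    have hbound : decide ((pre.length : Int) + 1 < (((pre ++ c :: rest)).length : Int))
        = !rest.isEmpty := by
      cases rest <;> simp
    have hdsp : PySem.Chars.isdigit ' ' = false := by decide
    have hcond : (pyPunct c && !rest.isEmpty && PySem.Chars.isdigit (rest.headD ' '))
        = (pyPunct c && nextDigit rest) := by
      cases rest <;> simp [nextDigit, hdsp]
    have hstep : ∀ acc' : List Char,
        (PySem.List.pyRange ((pre.length : Int) + 1) (((pre.length + (c :: rest).length : Nat) : Int)) 1).foldl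
          (fun acc i =>
            let character := PySem.List.pyGetD (pre ++ c :: rest) i ' '
            if PySem.Chars.isdigit character then acc
            else if pyPunct character && decide (i + 1 < ((pre ++ c :: rest).length : Int)) &&
                    PySem.Chars.isdigit (PySem.List.pyGetD (pre ++ c :: rest) (i + 1) ' ') then acc
            else acc ++ [character]) acc'
        = acc' ++ stripNum rest := by
      intro acc'
      have h := ih (pre ++ [c]) acc'
      have e1 : (((pre ++ [c]).length : Nat) : Int) = (pre.length : Int) + 1 := by
        push_cast [List.length_append, List.length_cons, List.length_nil]; ring
      have e2 : (((pre ++ [c]).length + rest.length : Nat) : Int)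
          = (((pre.length + (c :: rest).length : Nat) : Int)) := by
        push_cast [List.length_append, List.length_cons, List.length_nil]; ring
      rw [List.append_assoc, List.singleton_append, e1, e2] at h
      exact h
    simp only [hget, hget2, hbound, hcond, hstep]
    simp only [stripNum]
    split_ifs <;> simp

-- ===== VERDICT (by name: the statement is the Claim_ definition above) =====
theorem removeNumericCharactersFromText_spec : Claim_equal_removeNumericCharactersFromText := by
  intro rawText _
  unfold Spec_removeNumericCharactersFromText removeNumericCharactersFromText removeNumericCharactersFromText_alt
  dsimp only
  have hA := lemA rawText.toList [] []
  simp only [List.nil_append, List.length_nil, Nat.zero_add, Nat.cast_zero] at hA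
  rw [lemB rawText.toList]
  dsimp only
  rw [List.reverse_reverse]
  exact congrArg String.mk hA
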